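-- pv_equiv track=rewrite | github.com/MiracleX77/CheckIO | Scientific Expedition/Caps Lock.py | caps_lock
-- ===== SOURCE A (Python) =====
-- def caps_lock(text: str) -> str:
--     # your code here
--     control = 0
--     text=text.split("a")
--     for i in range(len(text)):
--         if control%2==1:
--             text[i]=text[i].upper()
--         control+=1
--     return "".join(text)
-- ===== SOURCE B (Python) =====
-- def caps_lock(text: str) -> str:
--     out = []
--     count = 0
--     for ch in text:
--         if ch == 'a':
--             count += 1
--         elif count % 2 == 1:
--             out.append(ch.upper())
--         else:
--             out.append(ch)
--     return "".join(out)
-- ===== Notes on version B (the rewrite author's own statement) =====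
-- stated objective: alternative
-- what changed: Replaces split-on-'a' into segments plus uppercasing odd-indexed segments by a single character pass that maintains a running count of 'a's and uppercases a character exactly when the count is odd.
import Mathlib
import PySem

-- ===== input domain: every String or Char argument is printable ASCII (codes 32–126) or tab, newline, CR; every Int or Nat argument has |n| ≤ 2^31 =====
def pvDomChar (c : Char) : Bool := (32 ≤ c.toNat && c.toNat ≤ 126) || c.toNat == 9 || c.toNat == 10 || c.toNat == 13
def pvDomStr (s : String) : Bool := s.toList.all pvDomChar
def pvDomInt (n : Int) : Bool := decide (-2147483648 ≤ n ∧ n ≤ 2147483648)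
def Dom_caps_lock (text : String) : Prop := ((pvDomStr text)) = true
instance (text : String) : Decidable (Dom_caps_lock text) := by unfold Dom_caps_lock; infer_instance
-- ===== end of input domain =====

-- B replaces the split-into-segments-then-uppercase-odd-indexed-segments structure by one
-- character pass with a running count of 'a's (objective: alternative).

-- ===== PORT A =====
-- text.split("a"); sep "a" is nonempty so Python's split never raises: getD [] is never taken.
def caps_lock (text : String) : String :=
  let segs := (PySem.Str.split? text "a").getD []
  let res := (PySem.List.pyRange 0 segs.length 1).foldl
    (fun (st : List String × Int) i =>
      -- text[i] = text[i].upper() when control is odd (item assignment ported by hand: set/getD at a valid index)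
      let lst := if st.2 % 2 == 1 then st.1.set i.toNat (PySem.Str.upper (st.1.getD i.toNat "")) else st.1
      (lst, st.2 + 1))
    (segs, 0)
  PySem.Str.join "" res.1

-- ===== PORT B =====
def caps_lock_alt (text : String) : String :=
  let r := text.toList.foldl
    (fun (st : List Char × Int) ch =>
      if ch = 'a' then (st.1, st.2 + 1)
      else if st.2 % 2 == 1 then (st.1 ++ [PySem.Chars.upperChar ch], st.2)
      else (st.1 ++ [ch], st.2))
    ([], 0)
  String.ofList r.1

-- ===== PRECONDITION & SPEC =====
def Spec_caps_lock (text : String) (out : String) : Prop := out = caps_lock_alt text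
instance (text : String) (out : String) : Decidable (Spec_caps_lock text out) := by unfold Spec_caps_lock; infer_instance

-- ===== CLAIM (what is proved, stated in full; the proofs are below) =====
def Claim_equal_caps_lock : Prop := ∀ (text : String), Dom_caps_lock text → Spec_caps_lock text (caps_lock text)

-- ===== LEMMAS AND PROOFS =====

-- simple recursive splitter on 'a' (proof-side characterisation of Chars.splitOn · ['a'])
def sA : List Char → List (List Char)
  | [] => [[]]
  | c :: cs =>
    if c = 'a' then [] :: sA cs
    else
      match sA cs with
      | [] => [[c]]
      | h :: t => (c :: h) :: t

-- prepend to the head segment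
def consH (x : List Char) : List (List Char) → List (List Char)
  | [] => [x]
  | h :: t => (x ++ h) :: t

lemma sA_ne_nil (cs : List Char) : sA cs ≠ [] := by
  cases cs with
  | nil => simp [sA]
  | cons c cs =>
    simp only [sA]
    split
    · simp
    · split <;> simp

lemma go_eq (l : List Char) : ∀ (fuel : Nat) (cur : List Char) (acc : List (List Char)),
    l.length < fuel →
    PySem.Chars.splitOn.go ['a'] fuel l cur acc = acc.reverse ++ consH cur.reverse (sA l) := by
  induction l with
  | nil =>
    intro fuel cur acc h
    match fuel, h with
    | fuel + 1, _ => simp [PySem.Chars.splitOn.go, sA, consH]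
  | cons c rest ih =>
    intro fuel cur acc h
    match fuel, h with
    | fuel + 1, h =>
      simp only [PySem.Chars.splitOn.go]
      by_cases hc : c = 'a'
      · have hpre : List.isPrefixOf ['a'] (c :: rest) = true := by
          simp [List.isPrefixOf, hc]
        rw [if_pos hpre]
        have hlt : rest.length < fuel := by simpa using Nat.lt_of_succ_lt_succ h
        rw [show List.drop (List.length ['a']) (c :: rest) = rest by simp]
        rw [ih fuel [] (cur.reverse :: acc) hlt]
        rcases hrest : sA rest with _ | ⟨h1, t1⟩
        · exact absurd hrest (sA_ne_nil rest)
        · simp [consH, sA, hc, hrest]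
      · have hpre : List.isPrefixOf ['a'] (c :: rest) = false := by
          simp [List.isPrefixOf]
          intro hh; exact absurd hh.symm hc
        rw [if_neg (by simp [hpre])]
        have hlt : rest.length < fuel := by simpa using Nat.lt_of_succ_lt_succ h
        rw [ih fuel (c :: cur) acc hlt]
        rcases hrest : sA rest with _ | ⟨h1, t1⟩
        · exact absurd hrest (sA_ne_nil rest)
        · simp [consH, sA, hc, hrest]

lemma splitOn_eq_sA (cs : List Char) : PySem.Chars.splitOn cs ['a'] = sA cs := by
  unfold PySem.Chars.splitOn
  rw [go_eq cs (cs.length + 1) [] [] (by omega)]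
  rcases hc : sA cs with _ | ⟨h, t⟩
  · exact absurd hc (sA_ne_nil cs)
  · simp [consH]

-- alternate-uppercasing, segment level (chars)
def mapAltC : Bool → List (List Char) → List (List Char)
  | _, [] => []
  | p, h :: t => (if p then PySem.Chars.upper h else h) :: mapAltC (!p) t

-- alternate-uppercasing, segment level (strings)
def mapAltS : Bool → List String → List String
  | _, [] => []
  | p, h :: t => (if p then PySem.Str.upper h else h) :: mapAltS (!p) t

-- streamed form
def altUp : Bool → List Char → List Char
  | _, [] => []
  | p, c :: cs =>
    if c = 'a' then altUp (!p) cs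
    else (if p then PySem.Chars.upperChar c else c) :: altUp p cs

lemma flatten_mapAltC_sA (cs : List Char) : ∀ p, (mapAltC p (sA cs)).flatten = altUp p cs := by
  induction cs with
  | nil => intro p; cases p <;> simp [sA, mapAltC, altUp, PySem.Chars.upper]
  | cons c rest ih =>
    intro p
    by_cases hc : c = 'a'
    · subst hc
      simp only [sA, if_pos rfl, altUp, if_pos rfl]
      cases p <;> simp [mapAltC, PySem.Chars.upper, ih]
    · simp only [sA, if_neg hc]
      rcases hrest : sA rest with _ | ⟨h1, t1⟩
      · exact absurd hrest (sA_ne_nil rest)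
      · have := ih p
        rw [hrest] at this
        cases p <;>
          simp_all [mapAltC, altUp, hc, PySem.Chars.upper]

lemma parity_flip (n : Int) : (((n + 1) % 2 == 1) : Bool) = !((n % 2 == 1) : Bool) := by
  have h0 : n % 2 = 0 ∨ n % 2 = 1 := by omega
  have h1 : (n + 1) % 2 = 1 - n % 2 := by omega
  rcases h0 with h | h <;> simp [h, h1]

lemma fold_pyRange_mapAltS (post : List String) :
    ∀ (pre : List String) (k : Nat),
    pre.length = k →
    ((PySem.List.pyRange (k : Int) ((k : Int) + post.length) 1).foldl
      (fun (st : List String × Int) i =>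
        let lst := if st.2 % 2 == 1 then st.1.set i.toNat (PySem.Str.upper (st.1.getD i.toNat "")) else st.1
        (lst, st.2 + 1))
      (pre ++ post, (k : Int))) =
    (pre ++ mapAltS ((((k : Int)) % 2 == 1)) post, (k : Int) + post.length) := by
  induction post with
  | nil =>
    intro pre k hk
    simp [PySem.List.pyRange, mapAltS]
  | cons s t ih =>
    intro pre k hk
    have hcons : PySem.List.pyRange (k : Int) ((k : Int) + (s :: t).length) 1
        = (k : Int) :: PySem.List.pyRange ((k : Int) + 1) ((k : Int) + (s :: t).length) 1 := by
      apply PySem.List.pyRange_one_cons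
      simp
    rw [hcons]
    simp only [List.foldl_cons]
    have hget : (pre ++ s :: t).getD ((k : Int)).toNat "" = s := by
      simp [← hk, List.getD]
    have hset : ∀ v, (pre ++ s :: t).set ((k : Int)).toNat v = pre ++ v :: t := by
      intro v
      rw [show ((k : Int)).toNat = pre.length by simp [hk]]
      simp
    by_cases hp : (((k : Int)) % 2 == 1 : Bool) = true
    · rw [if_pos hp, hget, hset]
      have H := ih (pre ++ [PySem.Str.upper s]) (k + 1) (by simp [hk])
      simp only [List.length_cons] at H ⊢
      push_cast at H ⊢
      rw [show ((k : Int) + ((t.length : Int) + 1)) = (k : Int) + 1 + t.length by ring]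
      rw [show pre ++ PySem.Str.upper s :: t = (pre ++ [PySem.Str.upper s]) ++ t by simp]
      rw [H, parity_flip, hp]
      simp [mapAltS, hp]
    · rw [if_neg hp]
      have H := ih (pre ++ [s]) (k + 1) (by simp [hk])
      simp only [List.length_cons] at H ⊢
      push_cast at H ⊢
      rw [show ((k : Int) + ((t.length : Int) + 1)) = (k : Int) + 1 + t.length by ring]
      rw [show pre ++ s :: t = (pre ++ [s]) ++ t by simp]
      rw [H, parity_flip]
      simp only [Bool.not_eq_true] at hp
      rw [hp]
      simp [mapAltS, hp]

lemma map_toList_mapAltS (segs : List String) :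
    ∀ p, (mapAltS p segs).map String.toList = mapAltC p (segs.map String.toList) := by
  induction segs with
  | nil => intro p; simp [mapAltS, mapAltC]
  | cons s t ih =>
    intro p
    cases p <;> simp [mapAltS, mapAltC, ih, PySem.Str.toList_upper]

lemma foldB (cs : List Char) : ∀ (acc : List Char) (n : Int),
    (cs.foldl
      (fun (st : List Char × Int) ch =>
        if ch = 'a' then (st.1, st.2 + 1)
        else if st.2 % 2 == 1 then (st.1 ++ [PySem.Chars.upperChar ch], st.2)
        else (st.1 ++ [ch], st.2))
      (acc, n)).1 = acc ++ altUp ((n % 2 == 1)) cs := by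
  induction cs with
  | nil => intro acc n; simp [altUp]
  | cons c rest ih =>
    intro acc n
    by_cases hc : c = 'a'
    · simp only [List.foldl_cons, if_pos hc]
      rw [ih acc (n + 1), parity_flip]
      simp [altUp, hc]
    · simp only [List.foldl_cons, if_neg hc]
      by_cases hp : ((n % 2 == 1) : Bool) = true
      · rw [if_pos hp, ih]
        simp [altUp, hc, hp]
      · rw [if_neg hp, ih]
        simp only [Bool.not_eq_true] at hp
        simp [altUp, hc, hp]

lemma join_nil_flatten (parts : List (List Char)) : PySem.Chars.join [] parts = parts.flatten := by
  induction parts with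
  | nil => simp [PySem.Chars.join, List.intercalate]
  | cons h t ih =>
    cases t with
    | nil => simp [PySem.Chars.join, List.intercalate]
    | cons h2 t2 =>
      rw [PySem.Chars.join_cons_cons, ih]
      simp

-- ===== VERDICT (by name: the statement is the Claim_ definition above) =====
theorem caps_lock_spec : Claim_equal_caps_lock := by
  intro text _
  unfold Spec_caps_lock caps_lock caps_lock_alt
  simp only []
  have hsplit : (PySem.Str.split? text "a").getD []
      = (PySem.Chars.splitOn text.toList ['a']).map String.ofList := by
    simp [PySem.Str.split?, PySem.Chars.split?]
  rw [hsplit, splitOn_eq_sA]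
  set segs := (sA text.toList).map String.ofList with hsegs
  have hfold := fold_pyRange_mapAltS segs [] 0 rfl
  simp only [List.nil_append, Nat.cast_zero] at hfold
  rw [show ((segs.length : Int)) = (0 : Int) + segs.length by ring]
  rw [hfold]
  rw [foldB]
  simp only [List.nil_append]
  have h02 : (((0 : Int) % 2 == 1) : Bool) = false := by decide
  rw [h02]
  show PySem.Str.join "" (mapAltS false segs) = String.ofList (altUp false text.toList)
  rw [PySem.Str.join]
  congr 1
  rw [map_toList_mapAltS]
  rw [show segs.map String.toList = sA text.toList by
    rw [hsegs, List.map_map]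
    simp [Function.comp_def, String.toList_ofList]]
  rw [show ("".toList : List Char) = [] from rfl]
  rw [join_nil_flatten, flatten_mapAltC_sA]
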